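-- pv_equiv track=rewrite | github.com/abrytskyy/PYTHON-Exercises | Full Stack/08.02hw.py | key_words_value_number_of_values
-- ===== SOURCE A (Python) =====
-- def key_words_value_number_of_values(a):
--     a1 = {}
--     for i in a:
--         num = 0
--         for j in i:
--
--             if j in "aeoui":
--                 num += 1
--         a1[i] = num
--     return a1
-- ===== SOURCE B (Python) =====
-- def key_words_value_number_of_values(a):
--     return {i: sum(i.count(v) for v in "aeoui") for i in a}
-- ===== Notes on version B (the rewrite author's own statement) =====
-- stated objective: idiomatic
-- what changed: Replaces A's explicit char-by-char membership loop with a dict comprehension that sums five whole-string str.count scans, one per vowel.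
import Mathlib
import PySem

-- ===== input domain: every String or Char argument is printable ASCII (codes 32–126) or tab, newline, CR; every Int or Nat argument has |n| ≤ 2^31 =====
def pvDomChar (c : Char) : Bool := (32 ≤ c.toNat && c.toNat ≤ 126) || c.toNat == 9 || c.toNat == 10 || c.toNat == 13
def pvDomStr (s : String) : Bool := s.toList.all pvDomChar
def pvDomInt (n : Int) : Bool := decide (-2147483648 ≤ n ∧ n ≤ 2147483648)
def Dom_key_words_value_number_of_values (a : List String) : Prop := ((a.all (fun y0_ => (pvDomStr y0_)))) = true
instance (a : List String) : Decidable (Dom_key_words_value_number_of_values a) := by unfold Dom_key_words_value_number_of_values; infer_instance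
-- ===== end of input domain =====

-- B replaces A's single char-by-char membership pass with a dict comprehension summing five str.count scans, one per vowel (idiomatic; return value only).


-- ===== PORT A =====
def key_words_value_number_of_values (a : List String) : List (String × Int) :=
  let a1 : PySem.Dict String Int :=
    a.foldl (fun a1 i =>
      let num : Int :=
        i.toList.foldl (fun num j =>
          if PySem.Str.isIn (String.singleton j) "aeoui" then num + 1 else num) 0
      a1.insert i num) PySem.Dict.empty
  a1.items

-- ===== PORT B =====
def key_words_value_number_of_values_alt (a : List String) : List (String × Int) :=
  (a.foldl (fun d i =>
      d.insert i (("aeoui".toList.map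
        (fun v => (PySem.Str.count i (String.singleton v) : Int))).sum))
    (PySem.Dict.empty : PySem.Dict String Int)).items

-- ===== PRECONDITION & SPEC =====
def Spec_key_words_value_number_of_values (a : List String) (out : List (String × Int)) : Prop := out = key_words_value_number_of_values_alt a
instance (a : List String) (out : List (String × Int)) : Decidable (Spec_key_words_value_number_of_values a out) := by unfold Spec_key_words_value_number_of_values; infer_instance

-- ===== CLAIM (what is proved, stated in full; the proofs are below) =====
def Claim_equal_key_words_value_number_of_values : Prop := ∀ (a : List String), Dom_key_words_value_number_of_values a → Spec_key_words_value_number_of_values a (key_words_value_number_of_values a)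

-- ===== LEMMAS AND PROOFS =====

-- a singleton list is an infix exactly when its element is a member
theorem singleton_infix_iff {α : Type} (c : α) (l : List α) : [c] <:+: l ↔ c ∈ l := by
  constructor
  · intro h; exact h.sublist.subset (List.mem_singleton_self c)
  · intro h
    obtain ⟨s, t, rfl⟩ := List.mem_iff_append.mp h
    exact ⟨s, t, by simp⟩

-- Chars.count.go with a singleton needle and enough fuel counts occurrences of the char
theorem count_go_singleton (v : Char) (l : List Char) (fuel acc : Nat)
    (h : l.length ≤ fuel) :
    PySem.Chars.count.go [v] fuel l acc = acc + l.count v := by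
  induction l generalizing fuel acc with
  | nil => cases fuel <;> simp [PySem.Chars.count.go]
  | cons c t ih =>
    cases fuel with
    | zero => simp at h
    | succ n =>
      have hn : t.length ≤ n := by simpa using h
      by_cases hc : c = v
      · subst hc
        simp [PySem.Chars.count.go, List.isPrefixOf, ih _ _ hn]
        omega
      · have : [v].isPrefixOf (c :: t) = false := by
          simp [List.isPrefixOf]
          intro hvc; exact hc (by simpa using hvc.symm)
        simp [PySem.Chars.count.go, this, ih _ _ hn, hc]

-- str.count with a single-character needle is List.count on the characters
theorem chars_count_singleton (l : List Char) (v : Char) :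
    PySem.Chars.count l [v] = l.count v := by
  simp [PySem.Chars.count, count_go_singleton v l l.length 0 le_rfl]

-- the five vowels are pairwise distinct, so the membership count splits into five per-vowel counts
theorem countP_vowels (l : List Char) :
    ((l.countP (fun j => decide (j ∈ (['a','e','o','u','i'] : List Char)))) : Int)
      = (l.count 'a' : Int) + (l.count 'e' : Int) + (l.count 'o' : Int)
        + (l.count 'u' : Int) + (l.count 'i' : Int) := by
  induction l with
  | nil => simp
  | cons c t ih =>
    simp only [List.countP_cons, List.count_cons]
    push_cast
    rw [ih]
    by_cases hc : c ∈ (['a','e','o','u','i'] : List Char)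
    · fin_cases hc <;> simp <;> ring
    · simp only [List.mem_cons, not_or] at hc
      obtain ⟨h1, h2, h3, h4, h5⟩ := hc
      simp [h1, h2, h3, h4, h5]

-- per word: the membership-test fold of A equals B's sum of five per-vowel counts
theorem word_value_eq (i : String) :
    (i.toList.foldl (fun num j =>
        if PySem.Str.isIn (String.singleton j) "aeoui" then num + 1 else num) (0 : Int))
    = (("aeoui".toList.map
        (fun v => (PySem.Str.count i (String.singleton v) : Int))).sum) := by
  have hfold := PySem.List.foldl_ite_add_one
    (p := fun j => PySem.Str.isIn (String.singleton j) "aeoui" = true) (l := i.toList) (a := (0:Int))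
  rw [show (fun (num : Int) j => if PySem.Str.isIn (String.singleton j) "aeoui" then num + 1 else num)
        = (fun (num : Int) j => if PySem.Str.isIn (String.singleton j) "aeoui" = true then num + 1 else num)
      from by funext num j; simp]
  rw [hfold]
  have hmem : ∀ j : Char, (PySem.Str.isIn (String.singleton j) "aeoui" = true)
      ↔ j ∈ ("aeoui".toList) := by
    intro j
    rw [show PySem.Str.isIn (String.singleton j) "aeoui"
          = PySem.Chars.isIn (String.singleton j).toList "aeoui".toList from by simp,
        show (String.singleton j).toList = [j] from by simp,
        PySem.Chars.isIn_iff_infix, singleton_infix_iff]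
  have hcnt : ∀ v : Char, (PySem.Str.count i (String.singleton v)) = (i.toList.count v) := by
    intro v
    rw [show PySem.Str.count i (String.singleton v)
          = PySem.Chars.count i.toList (String.singleton v).toList from by simp,
        show (String.singleton v).toList = [v] from by simp,
        chars_count_singleton]
  have hpred : (fun x => decide (PySem.Str.isIn (String.singleton x) "aeoui" = true))
      = (fun x => decide (x ∈ (['a','e','o','u','i'] : List Char))) := by
    funext j
    exact decide_eq_decide.mpr
      ((hmem j).trans (by rw [show ("aeoui".toList) = (['a','e','o','u','i'] : List Char) from rfl]))
  rw [hpred, countP_vowels]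
  simp only [hcnt, show ("aeoui".toList) = (['a','e','o','u','i'] : List Char) from rfl,
    List.map_cons, List.map_nil, List.sum_cons, List.sum_nil]
  ring

-- ===== VERDICT (by name: the statement is the Claim_ definition above) =====
theorem key_words_value_number_of_values_spec : Claim_equal_key_words_value_number_of_values := by
  intro a _
  unfold Spec_key_words_value_number_of_values key_words_value_number_of_values key_words_value_number_of_values_alt
  rw [show (fun (a1 : PySem.Dict String Int) (i : String) =>
        a1.insert i (i.toList.foldl (fun num j =>
          if PySem.Str.isIn (String.singleton j) "aeoui" then num + 1 else num) (0 : Int)))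
      = (fun (d : PySem.Dict String Int) (i : String) =>
        d.insert i (("aeoui".toList.map
          (fun v => (PySem.Str.count i (String.singleton v) : Int))).sum))
    from funext fun d => funext fun i => by rw [word_value_eq]]
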